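-- pv_equiv track=rewrite | github.com/johannesnicolaus/TOGA2 | src/python/modules/cesar_wrapper_executables.py | define_max_space
-- ===== SOURCE A (Python) =====
-- from typing import Any, Dict, Iterable, List, Set, TextIO, Tuple, Union
--
-- def define_max_space(
--     blocks: List[Tuple[int]], min_size: int, max_size: int
-- ) -> Tuple[int, int]:
--     """
--     For a given block set, select the largest interblock range so that
--     min_size <= x <= max_size
--     """
--     start, stop = (None, None)
--     if not blocks:
--         return (start, stop)
--     curr_max_size: int = 0
--     for i, f_block in enumerate(blocks):
--         for l_block in blocks[i + 1 :]:
--             space_size: int = l_block[2] - f_block[3] - 2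
--             if space_size > curr_max_size and min_size <= space_size <= max_size:
--                 curr_max_size = space_size
--                 start = f_block[3] + 1
--                 stop = l_block[2] - 1
--     return (start, stop)
-- ===== SOURCE B (Python) =====
-- def _bisect_left(a, x):
--     # first index k with a[k] >= x, on a sorted list (hand-rolled: bisect may not be imported)
--     lo, hi = 0, len(a)
--     while lo < hi:
--         mid = (lo + hi) // 2
--         if a[mid] < x:
--             lo = mid + 1
--         else:
--             hi = mid
--     return lo
--
--
-- def define_max_space(blocks, min_size, max_size):
--     """Largest interblock gap v with min_size <= v <= max_size, via a sorted prefix of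
--     block ends + binary search per right block, then one right-to-left pass to locate
--     the earliest left block achieving it."""
--     n = len(blocks)
--     if n == 0:
--         return (None, None)
--     lo_bound = max(min_size, 1)
--     v = 0
--     ends = []  # sorted f_block[3] values of blocks[0..j-1]
--     for j in range(1, n):
--         e = blocks[j - 1][3]
--         ends.insert(_bisect_left(ends, e), e)
--         l2 = blocks[j][2]
--         k = _bisect_left(ends, l2 - 2 - max_size)
--         if k < len(ends):
--             cand = l2 - 2 - ends[k]
--             if cand >= lo_bound and cand > v:
--                 v = cand
--     if v == 0:
--         return (None, None)
--     # earliest left block i with some later block starting exactly v past it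
--     seen = {blocks[n - 1][2]}
--     start = None
--     for i in range(n - 2, -1, -1):
--         b = blocks[i]
--         if b[3] + 2 + v in seen:
--             start = b[3] + 1
--         seen.add(b[2])
--     if start is None:
--         return (None, None)
--     return (start, start + v)
-- ===== Notes on version B (the rewrite author's own statement) =====
-- stated objective: faster
-- what changed: Replaces the all-pairs double loop with a single left-to-right pass that keeps the previous block ends in a sorted list queried by binary search for the best admissible gap per right block, followed by one linear right-to-left pass with a set of later block starts to reconstruct the earliest left endpoint.
import Mathlib
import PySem

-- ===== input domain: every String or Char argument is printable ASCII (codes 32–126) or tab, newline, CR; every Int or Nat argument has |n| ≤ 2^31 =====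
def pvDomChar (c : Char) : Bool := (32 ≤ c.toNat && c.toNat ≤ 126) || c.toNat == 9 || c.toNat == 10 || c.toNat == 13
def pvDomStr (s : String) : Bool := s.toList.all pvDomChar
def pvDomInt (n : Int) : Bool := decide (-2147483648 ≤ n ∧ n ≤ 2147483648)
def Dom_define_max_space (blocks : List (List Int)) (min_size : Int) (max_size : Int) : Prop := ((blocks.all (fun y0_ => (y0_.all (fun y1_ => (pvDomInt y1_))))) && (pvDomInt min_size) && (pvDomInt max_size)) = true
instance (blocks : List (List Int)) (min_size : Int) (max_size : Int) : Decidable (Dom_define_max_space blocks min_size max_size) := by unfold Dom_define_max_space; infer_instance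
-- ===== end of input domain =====

-- B replaces A's all-pairs O(n^2) scan by a sorted-prefix + binary-search pass computing the
-- best gap size, plus one linear right-to-left pass reconstructing the earliest left endpoint
-- (objective: faster).

-- ===== PORT A =====
-- literal transliteration of A's nested loop with running (curr_max_size, start, stop)
def define_max_space (blocks : List (List Int)) (min_size : Int) (max_size : Int) : Option Int × Option Int :=
  if blocks.isEmpty then (none, none) else
  let r := (PySem.List.enumerate blocks).foldl
    (fun (st : Int × Option Int × Option Int) (p : Int × List Int) =>
      (PySem.List.slice blocks (some (p.1 + 1)) none).foldl
        (fun (st : Int × Option Int × Option Int) (l : List Int) =>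
          let space := PySem.List.pyGetD l 2 0 - PySem.List.pyGetD p.2 3 0 - 2
          if space > st.1 ∧ min_size ≤ space ∧ space ≤ max_size then
            (space, some (PySem.List.pyGetD p.2 3 0 + 1), some (PySem.List.pyGetD l 2 0 - 1))
          else st)
        st)
    (0, none, none)
  (r.2.1, r.2.2)

-- ===== PORT B =====
-- Source B's hand-rolled _bisect_left is exactly bisect.bisect_left = PySem.List.bisectLeft
def define_max_space_alt (blocks : List (List Int)) (min_size : Int) (max_size : Int) : Option Int × Option Int :=
  let n := blocks.length
  if n = 0 then (none, none) else
  let lo_bound := max min_size 1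
  let st := (PySem.List.pyRange 1 (n : Int) 1).foldl
    (fun (st : Int × List Int) (j : Int) =>
      let e := PySem.List.pyGetD (PySem.List.pyGetD blocks (j - 1) []) 3 0
      let ends := PySem.List.insert st.2 ((PySem.List.bisectLeft st.2 e : Nat) : Int) e
      let l2 := PySem.List.pyGetD (PySem.List.pyGetD blocks j []) 2 0
      let k := PySem.List.bisectLeft ends (l2 - 2 - max_size)
      let v' := if k < ends.length then
          let cand := l2 - 2 - PySem.List.pyGetD ends ((k : Nat) : Int) 0
          if cand ≥ lo_bound ∧ cand > st.1 then cand else st.1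
        else st.1
      (v', ends))
    ((0 : Int), ([] : List Int))
  let v := st.1
  if v = 0 then (none, none) else
  let seen0 : PySem.Set Int :=
    PySem.Set.ofList [PySem.List.pyGetD (PySem.List.pyGetD blocks ((n : Int) - 1) []) 2 0]
  let r := (PySem.List.pyRange ((n : Int) - 2) (-1) (-1)).foldl
    (fun (st : Option Int × PySem.Set Int) (i : Int) =>
      let b := PySem.List.pyGetD blocks i []
      let s' := if PySem.Set.contains st.2 (PySem.List.pyGetD b 3 0 + 2 + v) then
          some (PySem.List.pyGetD b 3 0 + 1) else st.1
      (s', PySem.Set.add st.2 (PySem.List.pyGetD b 2 0)))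
    ((none : Option Int), seen0)
  match r.1 with
  | some s => (some s, some (s + v))
  | none => (none, none)

-- ===== PRECONDITION & SPEC =====
-- Pre_: exactly the inputs where A raises no IndexError: every block used as a left block
-- (all but the last) has at least 4 entries, every block used as a right block (all but the
-- first) has at least 3 entries; vacuous for 0 or 1 blocks.
def Pre_define_max_space (blocks : List (List Int)) (min_size : Int) (max_size : Int) : Prop :=
  (∀ b ∈ blocks.dropLast, 4 ≤ b.length) ∧ (∀ b ∈ blocks.tail, 3 ≤ b.length)
instance (blocks : List (List Int)) (min_size : Int) (max_size : Int) : Decidable (Pre_define_max_space blocks min_size max_size) := by unfold Pre_define_max_space; infer_instance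

def pvWitness_define_max_space : List (List Int) × Int × Int := ([[0, 0, 0, 0], [0, 0, 5, 5]], 1, 10)

def Spec_define_max_space (blocks : List (List Int)) (min_size : Int) (max_size : Int) (out : Option Int × Option Int) : Prop := out = define_max_space_alt blocks min_size max_size
instance (blocks : List (List Int)) (min_size : Int) (max_size : Int) (out : Option Int × Option Int) : Decidable (Spec_define_max_space blocks min_size max_size out) := by unfold Spec_define_max_space; infer_instance

-- ===== CLAIM (what is proved, stated in full; the proofs are below) =====
def Claim_equal_define_max_space : Prop := ∀ (blocks : List (List Int)) (min_size : Int) (max_size : Int), Dom_define_max_space blocks min_size max_size → Pre_define_max_space blocks min_size max_size → Spec_define_max_space blocks min_size max_size (define_max_space blocks min_size max_size)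

-- ===== LEMMAS AND PROOFS =====


def f3I (blocks : List (List Int)) (i : Int) : Int :=
  PySem.List.pyGetD (PySem.List.pyGetD blocks i []) 3 0
def l2I (blocks : List (List Int)) (j : Int) : Int :=
  PySem.List.pyGetD (PySem.List.pyGetD blocks j []) 2 0
def gval (blocks : List (List Int)) (i j : Int) : Int := l2I blocks j - f3I blocks i - 2

def pairsI (n : Int) : List (Int × Int) :=
  (PySem.List.pyRange 0 n 1).flatMap
    (fun i => (PySem.List.pyRange (i + 1) n 1).map (fun j => (i, j)))

-- inserting at bisect_left keeps the prefix list sorted and adds the element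
lemma bisect_insert_sorted (l : List Int) (e : Int) (hs : l.Pairwise (· ≤ ·)) :
    (PySem.List.insert l ((PySem.List.bisectLeft l e : Nat) : Int) e).Pairwise (· ≤ ·) ∧
    (PySem.List.insert l ((PySem.List.bisectLeft l e : Nat) : Int) e).Perm (e :: l) := by
  obtain ⟨hle, hlt, hge⟩ := PySem.List.bisectLeft_spec l e hs
  set k := PySem.List.bisectLeft l e with hk
  rw [PySem.List.insert_natCast l k e hle]
  constructor
  · rw [List.pairwise_append]
    refine ⟨hs.sublist (List.take_sublist _ _), ?_, ?_⟩
    · rw [List.pairwise_cons]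
      refine ⟨?_, hs.sublist (List.drop_sublist _ _)⟩
      intro y hy
      obtain ⟨m, hm, rfl⟩ := List.mem_drop_iff_getElem.mp hy
      exact hge _ _ (Nat.le_add_right _ _)
    · intro a ha b hb
      obtain ⟨m, hm, rfl⟩ := List.mem_take_iff_getElem.mp ha
      have hma : l[m] < e := hlt m (by omega) (by omega)
      rcases List.mem_cons.mp hb with rfl | hb
      · exact le_of_lt hma
      · obtain ⟨m', hm', rfl⟩ := List.mem_drop_iff_getElem.mp hb
        exact le_trans (le_of_lt hma) (hge _ _ (Nat.le_add_right _ _))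
  · have h := @List.perm_middle _ e (List.take k l) (List.drop k l)
    rwa [List.take_append_drop] at h

-- querying at bisect_left: the minimum element ≥ t, if any
lemma bisect_get_min (l : List Int) (t : Int) (hs : l.Pairwise (· ≤ ·))
    (hk : PySem.List.bisectLeft l t < l.length) :
    l[PySem.List.bisectLeft l t] ∈ l ∧ t ≤ l[PySem.List.bisectLeft l t] ∧
    ∀ x ∈ l, t ≤ x → l[PySem.List.bisectLeft l t] ≤ x := by
  obtain ⟨hle, hlt, hge⟩ := PySem.List.bisectLeft_spec l t hs
  set k := PySem.List.bisectLeft l t with hkdef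
  refine ⟨List.getElem_mem hk, hge k hk le_rfl, ?_⟩
  intro x hx htx
  obtain ⟨m, hm, rfl⟩ := List.mem_iff_getElem.mp hx
  rcases Nat.lt_or_ge m k with h | h
  · exact absurd (hlt m hm h) (by omega)
  · rcases Nat.eq_or_lt_of_le h with rfl | h
    · exact le_rfl
    · exact List.pairwise_iff_getElem.mp hs k m hk hm h

lemma bisect_all_lt (l : List Int) (t : Int) (hs : l.Pairwise (· ≤ ·))
    (hk : ¬ PySem.List.bisectLeft l t < l.length) : ∀ x ∈ l, x < t := by
  obtain ⟨hle, hlt, hge⟩ := PySem.List.bisectLeft_spec l t hs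
  intro x hx
  obtain ⟨m, hm, rfl⟩ := List.mem_iff_getElem.mp hx
  exact hlt m hm (by omega)
-- A's loop body on index pairs
def aStep (blocks : List (List Int)) (mn mx : Int) (st : Int × Option Int × Option Int)
    (p : Int × Int) : Int × Option Int × Option Int :=
  let x := gval blocks p.1 p.2
  if x > st.1 ∧ mn ≤ x ∧ x ≤ mx then
    (x, some (f3I blocks p.1 + 1), some (l2I blocks p.2 - 1))
  else st

-- the running max A maintains, as a scalar fold
def bStep (blocks : List (List Int)) (mn mx : Int) (a : Int) (p : Int × Int) : Int :=
  if gval blocks p.1 p.2 > a ∧ mn ≤ gval blocks p.1 p.2 ∧ gval blocks p.1 p.2 ≤ mx then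
    gval blocks p.1 p.2 else a

lemma bStep_le (blocks : List (List Int)) (mn mx : Int) (a : Int) (p : Int × Int) :
    a ≤ bStep blocks mn mx a p := by
  unfold bStep; split_ifs with h
  · exact le_of_lt h.1
  · exact le_rfl

lemma le_foldl_bStep (blocks : List (List Int)) (mn mx : Int) :
    ∀ (ps : List (Int × Int)) (a : Int), a ≤ ps.foldl (bStep blocks mn mx) a := by
  intro ps
  induction ps with
  | nil => intro a; exact le_rfl
  | cons p t ih =>
    intro a
    exact le_trans (bStep_le blocks mn mx a p) (ih _)

lemma foldl_bStep_valid (blocks : List (List Int)) (mn mx : Int) :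
    ∀ (ps : List (Int × Int)) (a : Int), ps.foldl (bStep blocks mn mx) a ≠ a →
      mn ≤ ps.foldl (bStep blocks mn mx) a ∧ ps.foldl (bStep blocks mn mx) a ≤ mx := by
  intro ps
  induction ps with
  | nil => intro a h; exact absurd rfl h
  | cons p t ih =>
    intro a h
    simp only [List.foldl_cons] at *
    by_cases hb : bStep blocks mn mx a p = a
    · rw [hb] at h ⊢; exact ih a h
    · by_cases ht : t.foldl (bStep blocks mn mx) (bStep blocks mn mx a p) = bStep blocks mn mx a p
      · rw [ht]
        unfold bStep at hb ⊢
        split_ifs at hb ⊢ with hcond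
        · exact ⟨hcond.2.1, hcond.2.2⟩
        · exact absurd rfl hb
      · exact ih _ ht

lemma foldl_bStep_attained (blocks : List (List Int)) (mn mx : Int) :
    ∀ (ps : List (Int × Int)) (a : Int), ps.foldl (bStep blocks mn mx) a ≠ a →
      ∃ p ∈ ps, gval blocks p.1 p.2 = ps.foldl (bStep blocks mn mx) a := by
  intro ps
  induction ps with
  | nil => intro a h; exact absurd rfl h
  | cons p t ih =>
    intro a h
    simp only [List.foldl_cons] at *
    by_cases ht : t.foldl (bStep blocks mn mx) (bStep blocks mn mx a p) = bStep blocks mn mx a p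
    · rw [ht] at h ⊢
      refine ⟨p, List.mem_cons_self, ?_⟩
      unfold bStep at h ⊢
      split_ifs at h ⊢ with hcond
      · rfl
      · exact absurd rfl h
    · obtain ⟨q, hq, hqv⟩ := ih _ ht
      exact ⟨q, List.mem_cons_of_mem _ hq, hqv⟩

lemma foldl_bStep_ub (blocks : List (List Int)) (mn mx : Int) :
    ∀ (ps : List (Int × Int)) (a : Int) (p : Int × Int), p ∈ ps →
      mn ≤ gval blocks p.1 p.2 → gval blocks p.1 p.2 ≤ mx →
      gval blocks p.1 p.2 ≤ ps.foldl (bStep blocks mn mx) a := by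
  intro ps
  induction ps with
  | nil => intro a p h; exact absurd h (List.not_mem_nil)
  | cons q t ih =>
    intro a p hp hmn hmx
    simp only [List.foldl_cons]
    rcases List.mem_cons.mp hp with rfl | hp
    · refine le_trans ?_ (le_foldl_bStep blocks mn mx t _)
      unfold bStep
      split_ifs with hcond
      · exact le_rfl
      · have : ¬ gval blocks p.1 p.2 > a := fun h => hcond ⟨h, hmn, hmx⟩
        omega
    · exact ih _ p hp hmn hmx

-- the full characterisation of A's fold: running max + first pair attaining it
lemma foldl_aStep_char (blocks : List (List Int)) (mn mx : Int) :
    ∀ (ps : List (Int × Int)) (st : Int × Option Int × Option Int),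
      ps.foldl (aStep blocks mn mx) st =
        (ps.foldl (bStep blocks mn mx) st.1,
         if ps.foldl (bStep blocks mn mx) st.1 = st.1 then st.2
         else match ps.find? (fun p => gval blocks p.1 p.2 == ps.foldl (bStep blocks mn mx) st.1) with
              | some p => (some (f3I blocks p.1 + 1), some (l2I blocks p.2 - 1))
              | none => st.2) := by
  intro ps
  induction ps with
  | nil => intro st; simp
  | cons p t ih =>
    intro st
    simp only [List.foldl_cons]
    by_cases hcond : gval blocks p.1 p.2 > st.1 ∧ mn ≤ gval blocks p.1 p.2 ∧ gval blocks p.1 p.2 ≤ mx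
    · have hstep : aStep blocks mn mx st p =
        (gval blocks p.1 p.2, some (f3I blocks p.1 + 1), some (l2I blocks p.2 - 1)) := by
        unfold aStep; rw [if_pos hcond]
      have hb : bStep blocks mn mx st.1 p = gval blocks p.1 p.2 := by
        unfold bStep; rw [if_pos hcond]
      rw [hstep, hb, ih]
      set b := t.foldl (bStep blocks mn mx) (gval blocks p.1 p.2) with hbdef
      have hge : gval blocks p.1 p.2 ≤ b := le_foldl_bStep blocks mn mx t _
      have hbne : b ≠ st.1 := by omega
      rw [if_neg hbne]
      by_cases heq : gval blocks p.1 p.2 = b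
      · rw [if_pos heq.symm, List.find?_cons_of_pos (by simpa using heq)]
      · rw [if_neg (fun h => heq h.symm), List.find?_cons_of_neg (by simpa using heq)]
        obtain ⟨q, hq, hqv⟩ := foldl_bStep_attained blocks mn mx t _ (fun h => heq h.symm)
        have hsome : (t.find? (fun p => gval blocks p.1 p.2 == b)).isSome := by
          rw [List.find?_isSome]
          exact ⟨q, hq, beq_iff_eq.mpr hqv⟩
        obtain ⟨r, hf⟩ := Option.isSome_iff_exists.mp hsome
        rw [hf]
    · have hstep : aStep blocks mn mx st p = st := by
        unfold aStep; rw [if_neg hcond]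
      have hb : bStep blocks mn mx st.1 p = st.1 := by
        unfold bStep; rw [if_neg hcond]
      rw [hstep, hb, ih]
      by_cases heq : t.foldl (bStep blocks mn mx) st.1 = st.1
      · rw [if_pos heq, if_pos heq]
      · rw [if_neg heq, if_neg heq]
        have hval := foldl_bStep_valid blocks mn mx t st.1 heq
        have hgt : st.1 < t.foldl (bStep blocks mn mx) st.1 :=
          lt_of_le_of_ne (le_foldl_bStep blocks mn mx t st.1) (Ne.symm heq)
        rw [List.find?_cons_of_neg]
        simp only [beq_iff_eq]
        intro h
        exact hcond (by rw [h]; exact ⟨hgt, hval.1, hval.2⟩)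
lemma A_norm (blocks : List (List Int)) (mn mx : Int) :
    define_max_space blocks mn mx =
      if blocks.isEmpty then (none, none)
      else ((pairsI (blocks.length : Int)).foldl (aStep blocks mn mx) (0, none, none)).2 := by
  by_cases hb : blocks.isEmpty
  · simp [define_max_space, hb]
  · unfold define_max_space
    rw [if_neg hb, if_neg hb]
    rw [PySem.List.enumerate_eq_map_pyRange blocks [], List.foldl_map]
    have hcg : (PySem.List.pyRange 0 (PySem.List.len blocks) 1).foldl
        (fun (st : Int × Option Int × Option Int) (y : Int) =>
          (PySem.List.slice blocks (some ((y, PySem.List.pyGetD blocks y ([]:List Int)).1 + 1)) none).foldl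
            (fun (st : Int × Option Int × Option Int) (l : List Int) =>
              let space := PySem.List.pyGetD l 2 0 - PySem.List.pyGetD (y, PySem.List.pyGetD blocks y ([]:List Int)).2 3 0 - 2
              if space > st.1 ∧ mn ≤ space ∧ space ≤ mx then
                (space, some (PySem.List.pyGetD (y, PySem.List.pyGetD blocks y ([]:List Int)).2 3 0 + 1),
                 some (PySem.List.pyGetD l 2 0 - 1))
              else st)
            st) (0, none, none)
      = (PySem.List.pyRange 0 (PySem.List.len blocks) 1).foldl
        (fun st i => (PySem.List.pyRange (i + 1) (PySem.List.len blocks) 1).foldl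
            (fun st2 j => aStep blocks mn mx st2 (i, j)) st) (0, none, none) := by
      apply PySem.List.foldl_congr_mem
      intro acc i hi
      have h0 : 0 ≤ i := (PySem.List.mem_pyRange_one.mp hi).1
      rw [show ((i, PySem.List.pyGetD blocks i ([]:List Int)).1 + 1) = i + 1 from rfl,
          PySem.List.slice_from blocks (by omega : (0:Int) ≤ i + 1),
          ← PySem.List.map_pyGetD_pyRange blocks ([]:List Int) (by omega : (0:Int) ≤ i + 1),
          List.foldl_map]
      rfl
    rw [hcg]
    unfold pairsI
    rw [List.foldl_flatMap]
    simp only [List.foldl_map, PySem.List.len_eq]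
-- B's phase-1 loop body (the port's lambda, named for the proofs; defeq to the lambda)
def p1E (blocks : List (List Int)) (ends0 : List Int) (j : Int) : List Int :=
  PySem.List.insert ends0 ((PySem.List.bisectLeft ends0 (f3I blocks (j - 1)) : Nat) : Int)
    (f3I blocks (j - 1))

def p1Cand (blocks : List (List Int)) (mx : Int) (ends : List Int) (j : Int) : Int :=
  l2I blocks j - 2 -
    PySem.List.pyGetD ends ((PySem.List.bisectLeft ends (l2I blocks j - 2 - mx) : Nat) : Int) 0

def p1Step (blocks : List (List Int)) (mn mx : Int) (st : Int × List Int) (j : Int) :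
    Int × List Int :=
  (if PySem.List.bisectLeft (p1E blocks st.2 j) (l2I blocks j - 2 - mx) < (p1E blocks st.2 j).length
   then
     if p1Cand blocks mx (p1E blocks st.2 j) j ≥ max mn 1 ∧
        p1Cand blocks mx (p1E blocks st.2 j) j > st.1
     then p1Cand blocks mx (p1E blocks st.2 j) j else st.1
   else st.1,
   p1E blocks st.2 j)

def Inv1 (blocks : List (List Int)) (mn mx : Int) (J : Int) (st : Int × List Int) : Prop :=
  st.2.Pairwise (· ≤ ·) ∧
  st.2.Perm ((PySem.List.pyRange 0 (J - 1) 1).map (f3I blocks)) ∧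
  0 ≤ st.1 ∧
  (st.1 = 0 ∨ ∃ i j : Int, 0 ≤ i ∧ i < j ∧ j < J ∧ mn ≤ gval blocks i j ∧
      gval blocks i j ≤ mx ∧ 0 < gval blocks i j ∧ gval blocks i j = st.1) ∧
  (∀ i j : Int, 0 ≤ i → i < j → j < J → mn ≤ gval blocks i j → gval blocks i j ≤ mx →
      gval blocks i j ≤ st.1)

lemma p1Step_inv (blocks : List (List Int)) (mn mx : Int) (J : Int) (hJ1 : 1 ≤ J)
    (st : Int × List Int) (h : Inv1 blocks mn mx J st) :
    Inv1 blocks mn mx (J + 1) (p1Step blocks mn mx st J) := by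
  obtain ⟨hsort, hperm, hv0, hatt, hub⟩ := h
  obtain ⟨hsort', hperm0⟩ := bisect_insert_sorted st.2 (f3I blocks (J - 1)) hsort
  rw [show PySem.List.insert st.2 ((PySem.List.bisectLeft st.2 (f3I blocks (J-1)) : Nat) : Int)
        (f3I blocks (J-1)) = p1E blocks st.2 J from rfl] at hsort' hperm0
  set ends := p1E blocks st.2 J with hends
  have hperm' : ends.Perm ((PySem.List.pyRange 0 (J + 1 - 1) 1).map (f3I blocks)) := by
    have hrange : PySem.List.pyRange 0 (J + 1 - 1) 1 =
        PySem.List.pyRange 0 (J - 1) 1 ++ [J - 1] := by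
      rw [show J + 1 - 1 = (J - 1) + 1 by ring, PySem.List.pyRange_one_succ_right (by omega)]
    rw [hrange, List.map_append]
    have h1 : (List.map (f3I blocks) (PySem.List.pyRange 0 (J-1) 1) ++
        [f3I blocks (J-1)]).Perm (f3I blocks (J-1) ::
          List.map (f3I blocks) (PySem.List.pyRange 0 (J-1) 1)) := by
      have h0 := List.perm_middle (a := f3I blocks (J-1))
        (l₁ := List.map (f3I blocks) (PySem.List.pyRange 0 (J-1) 1)) (l₂ := [])
      simpa using h0
    exact (hperm0.trans (hperm.cons _)).trans h1.symm
  have hmem : ∀ x, x ∈ ends ↔ ∃ i : Int, 0 ≤ i ∧ i < J ∧ f3I blocks i = x := by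
    intro x
    rw [hperm'.mem_iff, List.mem_map]
    constructor
    · rintro ⟨i, hi, rfl⟩
      have := PySem.List.mem_pyRange_one.mp hi
      exact ⟨i, by omega, by omega, rfl⟩
    · rintro ⟨i, h0, hJ, rfl⟩
      exact ⟨i, PySem.List.mem_pyRange_one.mpr (by omega), rfl⟩
  have hgv : ∀ i : Int, gval blocks i J = l2I blocks J - f3I blocks i - 2 := fun i => rfl
  unfold p1Step
  rw [← hends]
  by_cases hkl : PySem.List.bisectLeft ends (l2I blocks J - 2 - mx) < ends.length
  · obtain ⟨hkmem, hkge, hkmin⟩ := bisect_get_min ends (l2I blocks J - 2 - mx) hsort' hkl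
    have hget : PySem.List.pyGetD ends
        ((PySem.List.bisectLeft ends (l2I blocks J - 2 - mx) : Nat) : Int) 0 =
        ends[PySem.List.bisectLeft ends (l2I blocks J - 2 - mx)] := by
      rw [PySem.List.pyGetD_natCast, List.getD_eq_getElem?_getD, List.getElem?_eq_getElem hkl]
      rfl
    rw [if_pos hkl]
    have hcand' : p1Cand blocks mx ends J =
        l2I blocks J - 2 - ends[PySem.List.bisectLeft ends (l2I blocks J - 2 - mx)] := by
      rw [p1Cand, hget]
    set cand := p1Cand blocks mx ends J with hcanddef
    have hcandmx : cand ≤ mx := by omega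
    obtain ⟨ia, hia0, hiaJ, hiae⟩ :=
      (hmem ends[PySem.List.bisectLeft ends (l2I blocks J - 2 - mx)]).mp hkmem
    have hcand_att : gval blocks ia J = cand := by rw [hgv, hiae]; omega
    have hub_new : ∀ i : Int, 0 ≤ i → i < J → mn ≤ gval blocks i J →
        gval blocks i J ≤ mx → gval blocks i J ≤ cand := by
      intro i h0 hiJ hmn' hmx'
      have hgvi := hgv i
      have hthr : l2I blocks J - 2 - mx ≤ f3I blocks i := by omega
      have hmemi : f3I blocks i ∈ ends := (hmem _).mpr ⟨i, h0, hiJ, rfl⟩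
      have := hkmin _ hmemi hthr
      omega
    by_cases hcc : cand ≥ max mn 1 ∧ cand > st.1
    · rw [if_pos hcc]
      refine ⟨hsort', hperm', by omega, ?_, ?_⟩
      · right
        exact ⟨ia, J, hia0, hiaJ, by omega, by omega, by omega, by omega, hcand_att⟩
      · intro i j h0 hij hjJ hmn' hmx'
        rcases lt_or_eq_of_le (show j ≤ J by omega) with hlt | rfl
        · have := hub i j h0 hij hlt hmn' hmx'; omega
        · exact hub_new i h0 hij hmn' hmx'
    · rw [if_neg hcc]
      refine ⟨hsort', hperm', hv0, ?_, ?_⟩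
      · rcases hatt with h0' | ⟨i, j, hh⟩
        · exact Or.inl h0'
        · exact Or.inr ⟨i, j, hh.1, hh.2.1, by omega, hh.2.2.2.1, hh.2.2.2.2.1,
            hh.2.2.2.2.2.1, hh.2.2.2.2.2.2⟩
      · intro i j h0 hij hjJ hmn' hmx'
        rcases lt_or_eq_of_le (show j ≤ J by omega) with hlt | rfl
        · exact hub i j h0 hij hlt hmn' hmx'
        · have hle := hub_new i h0 hij hmn' hmx'
          rcases not_and_or.mp hcc with hc1 | hc2 <;> omega
  · have hall := bisect_all_lt ends (l2I blocks J - 2 - mx) hsort' hkl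
    rw [if_neg hkl]
    refine ⟨hsort', hperm', hv0, ?_, ?_⟩
    · rcases hatt with h0' | ⟨i, j, hh⟩
      · exact Or.inl h0'
      · exact Or.inr ⟨i, j, hh.1, hh.2.1, by omega, hh.2.2.2.1, hh.2.2.2.2.1,
          hh.2.2.2.2.2.1, hh.2.2.2.2.2.2⟩
    · intro i j h0 hij hjJ hmn' hmx'
      rcases lt_or_eq_of_le (show j ≤ J by omega) with hlt | rfl
      · exact hub i j h0 hij hlt hmn' hmx'
      · have hmemi : f3I blocks i ∈ ends := (hmem _).mpr ⟨i, h0, hij, rfl⟩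
        have := hall _ hmemi
        have := hgv i
        omega

lemma phase1_fold_inv (blocks : List (List Int)) (mn mx : Int) :
    ∀ J : Nat, (J : Int) ≤ blocks.length →
      Inv1 blocks mn mx (max (J : Int) 1)
        ((PySem.List.pyRange 1 (J : Int) 1).foldl (p1Step blocks mn mx) (0, [])) := by
  intro J
  induction J with
  | zero =>
    intro _
    rw [PySem.List.pyRange_one_eq_nil (by omega)]
    exact ⟨List.Pairwise.nil, by simp [PySem.List.pyRange_one_eq_nil], le_rfl, Or.inl rfl,
      fun i j h0 hij hjJ _ _ => by omega⟩
  | succ J ih =>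
    intro hlen
    by_cases hJ0 : J = 0
    · subst hJ0
      rw [show (((0:Nat) + 1 : Nat) : Int) = 1 by norm_num, PySem.List.pyRange_one_eq_nil (by omega)]
      exact ⟨List.Pairwise.nil, by simp [PySem.List.pyRange_one_eq_nil], le_rfl, Or.inl rfl,
        fun i j h0 hij hjJ _ _ => by omega⟩
    · have h1J : 1 ≤ (J : Int) := by omega
      have hInvJ : Inv1 blocks mn mx (J : Int)
          ((PySem.List.pyRange 1 (J : Int) 1).foldl (p1Step blocks mn mx) (0, [])) := by
        have := ih (by push_cast at hlen ⊢; omega)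
        rwa [max_eq_left h1J] at this
      have hstep := p1Step_inv blocks mn mx (J : Int) h1J _ hInvJ
      have hrw : PySem.List.pyRange 1 (((J:Nat) + 1 : Nat) : Int) 1 =
          PySem.List.pyRange 1 (J : Int) 1 ++ [(J : Int)] := by
        push_cast
        exact PySem.List.pyRange_one_succ_right (by omega)
      rw [hrw, List.foldl_append]
      simp only [List.foldl_cons, List.foldl_nil]
      have hmax : max (((J:Nat) + 1 : Nat) : Int) 1 = (J : Int) + 1 := by push_cast; omega
      rw [hmax]
      exact hstep
lemma mem_pairsI (n : Int) (p : Int × Int) :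
    p ∈ pairsI n ↔ 0 ≤ p.1 ∧ p.1 < p.2 ∧ p.2 < n := by
  unfold pairsI
  rw [List.mem_flatMap]
  constructor
  · rintro ⟨i, hi, hp⟩
    rw [List.mem_map] at hp
    obtain ⟨j, hj, rfl⟩ := hp
    have h1 := PySem.List.mem_pyRange_one.mp hi
    have h2 := PySem.List.mem_pyRange_one.mp hj
    exact ⟨h1.1, by simpa using h2.1, h2.2⟩
  · rintro ⟨h0, hij, hn⟩
    refine ⟨p.1, PySem.List.mem_pyRange_one.mpr ⟨h0, by omega⟩,
      List.mem_map.mpr ⟨p.2, PySem.List.mem_pyRange_one.mpr ⟨by omega, hn⟩, rfl⟩⟩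

lemma value_eq (blocks : List (List Int)) (mn mx : Int) :
    ((PySem.List.pyRange 1 (blocks.length : Int) 1).foldl (p1Step blocks mn mx) (0, [])).1 =
    (pairsI (blocks.length : Int)).foldl (bStep blocks mn mx) 0 := by
  obtain ⟨-, -, hv0, hatt, hub⟩ := phase1_fold_inv blocks mn mx blocks.length le_rfl
  set vB := ((PySem.List.pyRange 1 (blocks.length : Int) 1).foldl (p1Step blocks mn mx) (0, [])).1
  set b := (pairsI (blocks.length : Int)).foldl (bStep blocks mn mx) 0 with hbdef
  apply le_antisymm
  · rcases hatt with h0 | ⟨i, j, h⟩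
    · rw [h0]; exact le_foldl_bStep blocks mn mx _ 0
    · have hjn : j < (blocks.length : Int) := by
        by_cases hl : 1 ≤ (blocks.length : Int)
        · have := max_eq_left hl ▸ h.2.2.1; omega
        · have hm : max ((blocks.length : Nat) : Int) 1 = 1 := by omega
          rw [hm] at h
          omega
      have hmem : (i, j) ∈ pairsI (blocks.length : Int) :=
        (mem_pairsI _ _).mpr ⟨h.1, h.2.1, hjn⟩
      have := foldl_bStep_ub blocks mn mx _ 0 (i, j) hmem h.2.2.2.1 h.2.2.2.2.1
      have heq := h.2.2.2.2.2.2
      simp only at this heq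
      omega
  · by_cases hb0 : b = 0
    · rw [hb0]; exact hv0
    · obtain ⟨p, hp, hpv⟩ := foldl_bStep_attained blocks mn mx _ 0 hb0
      have hval := foldl_bStep_valid blocks mn mx _ 0 hb0
      obtain ⟨h0, hij, hn⟩ := (mem_pairsI _ _).mp hp
      have := hub p.1 p.2 h0 hij (lt_of_lt_of_le hn (le_max_left _ _))
        (by rw [hpv]; exact hval.1) (by rw [hpv]; exact hval.2)
      omega

-- B's phase-2 loop body (the port's lambda, named for the proofs; defeq to the lambda)
def p2Step (blocks : List (List Int)) (v : Int) (st : Option Int × PySem.Set Int) (i : Int) :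
    Option Int × PySem.Set Int :=
  (if PySem.Set.contains st.2 (f3I blocks i + 2 + v) then some (f3I blocks i + 1) else st.1,
   PySem.Set.add st.2 (l2I blocks i))

-- witness predicate: some later block starts exactly v past block i
abbrev W (blocks : List (List Int)) (n v i : Int) : Prop :=
  ∃ j ∈ PySem.List.pyRange (i + 1) n 1, l2I blocks j = f3I blocks i + 2 + v

lemma phase2_fold (blocks : List (List Int)) (n v : Int) :
    ∀ (m : Nat) (s : Option Int) (t : PySem.Set Int), (m : Int) < n →
      (∀ x, x ∈ t ↔ ∃ j ∈ PySem.List.pyRange ((m : Int) + 1) n 1, l2I blocks j = x) →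
      ((PySem.List.pyRange (m : Int) (-1) (-1)).foldl (p2Step blocks v) (s, t)).1 =
        match (PySem.List.pyRange 0 ((m : Int) + 1) 1).find?
            (fun i => decide (W blocks n v i)) with
        | some i => some (f3I blocks i + 1)
        | none => s := by
  intro m
  induction m with
  | zero =>
    intro s t hmn ht
    rw [show ((0:Nat):Int) = 0 from rfl, PySem.List.pyRange_neg_one_cons (by omega),
        PySem.List.pyRange_neg_one_eq_nil (by omega)]
    simp only [List.foldl_cons, List.foldl_nil]
    rw [show PySem.List.pyRange 0 (0 + 1) 1 = [0] from PySem.List.pyRange_one_singleton 0]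
    unfold p2Step
    simp only [Nat.cast_zero] at ht
    have hmemt : (f3I blocks 0 + 2 + v ∈ t) ↔ W blocks n v 0 := by
      rw [W]; exact ht _
    by_cases hWp : W blocks n v 0 <;> simp [hmemt, hWp]
  | succ m ih =>
    intro s t hmn ht
    have hcast : (((m + 1 : Nat)) : Int) = (m : Int) + 1 := by push_cast; ring
    rw [hcast, PySem.List.pyRange_neg_one_cons (by omega)]
    rw [show (m : Int) + 1 - 1 = (m : Int) by ring]
    simp only [List.foldl_cons]
    have hstep : p2Step blocks v (s, t) ((m : Int) + 1) =
        (if PySem.Set.contains t (f3I blocks ((m:Int)+1) + 2 + v)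
         then some (f3I blocks ((m:Int)+1) + 1) else s,
         PySem.Set.add t (l2I blocks ((m:Int)+1))) := rfl
    rw [hstep]
    have ht' : ∀ x, x ∈ PySem.Set.add t (l2I blocks ((m:Int)+1)) ↔
        ∃ j ∈ PySem.List.pyRange ((m : Int) + 1) n 1, l2I blocks j = x := by
      intro x
      rw [PySem.Set.mem_add, ht]
      rw [PySem.List.pyRange_one_cons (by omega : (m:Int) + 1 < n)]
      constructor
      · rintro (⟨j, hj, rfl⟩ | rfl)
        · exact ⟨j, List.mem_cons_of_mem _ hj, rfl⟩
        · exact ⟨(m:Int)+1, List.mem_cons_self, rfl⟩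
      · rintro ⟨j, hj, rfl⟩
        rcases List.mem_cons.mp hj with rfl | hj
        · exact Or.inr rfl
        · exact Or.inl ⟨j, hj, rfl⟩
    rw [ih _ _ (by omega) ht']
    have hsplit : PySem.List.pyRange 0 ((m : Int) + 1 + 1) 1 =
        PySem.List.pyRange 0 ((m : Int) + 1) 1 ++ [(m : Int) + 1] :=
      PySem.List.pyRange_one_succ_right (by omega)
    rw [hsplit, List.find?_append]
    cases hf : (PySem.List.pyRange 0 ((m : Int) + 1) 1).find? (fun i => decide (W blocks n v i)) with
    | some i => simp [Option.or]
    | none =>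
      simp only [Option.none_or]
      rw [hcast] at ht
      have hmemt : (f3I blocks ((m:Int)+1) + 2 + v ∈ t) ↔ W blocks n v ((m:Int)+1) := by
        rw [W]; exact ht _
      by_cases hWp : W blocks n v ((m:Int)+1) <;> simp [hmemt, hWp]

lemma find_pairs (blocks : List (List Int)) (b n : Int) (d : Option Int × Option Int) :
    ∀ L : List Int,
    (match L.findSome? (fun i => ((PySem.List.pyRange (i+1) n 1).find?
        (fun j => gval blocks i j == b)).map (fun j => (i, j))) with
     | some p => (some (f3I blocks p.1 + 1), some (l2I blocks p.2 - 1))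
     | none => d) =
    (match L.find? (fun i => decide (W blocks n b i)) with
     | some i => (some (f3I blocks i + 1), some (f3I blocks i + 1 + b))
     | none => d) := by
  intro L
  induction L with
  | nil => simp
  | cons a t ih =>
    rw [List.findSome?_cons, List.find?_cons]
    have hpred : ((PySem.List.pyRange (a+1) n 1).find? (fun j => gval blocks a j == b)).isSome =
        decide (W blocks n b a) := by
      apply Bool.eq_iff_iff.mpr
      rw [List.find?_isSome, decide_eq_true_iff]
      unfold W
      constructor
      · rintro ⟨j, hj, hp⟩
        have : gval blocks a j = b := by simpa using hp
        refine ⟨j, hj, ?_⟩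
        unfold gval at this; omega
      · rintro ⟨j, hj, hp⟩
        refine ⟨j, hj, ?_⟩
        have : gval blocks a j = b := by unfold gval; omega
        simpa using this
    cases hF : (PySem.List.pyRange (a+1) n 1).find? (fun j => gval blocks a j == b) with
    | some j =>
      have hW : decide (W blocks n b a) = true := by rw [← hpred, hF]; rfl
      have hgv : gval blocks a j = b := by simpa using List.find?_some hF
      have hl2 : l2I blocks j - 1 = f3I blocks a + 1 + b := by unfold gval at hgv; omega
      simp [hW, hl2]
    | none =>
      have hW : decide (W blocks n b a) = false := by rw [← hpred, hF]; rfl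
      simpa [hF, hW] using ih

lemma equal_all (blocks : List (List Int)) (mn mx : Int) :
    define_max_space blocks mn mx = define_max_space_alt blocks mn mx := by
  rw [A_norm]
  have hB : define_max_space_alt blocks mn mx =
      (if blocks.length = 0 then (none, none)
       else if ((PySem.List.pyRange 1 (blocks.length : Int) 1).foldl
           (p1Step blocks mn mx) (0, [])).1 = 0 then (none, none)
       else match ((PySem.List.pyRange ((blocks.length : Int) - 2) (-1) (-1)).foldl
           (p2Step blocks (((PySem.List.pyRange 1 (blocks.length : Int) 1).foldl
             (p1Step blocks mn mx) (0, [])).1))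
           (none, PySem.Set.ofList [l2I blocks ((blocks.length : Int) - 1)])).1 with
         | some s => (some s, some (s + ((PySem.List.pyRange 1 (blocks.length : Int) 1).foldl
             (p1Step blocks mn mx) (0, [])).1))
         | none => (none, none)) := rfl
  rw [hB, value_eq blocks mn mx]
  by_cases hemp : blocks.isEmpty
  · have h0 : blocks.length = 0 := by simpa [List.isEmpty_iff, List.length_eq_zero_iff] using hemp
    rw [if_pos hemp, if_pos h0]
  · have h0 : ¬ blocks.length = 0 := by
      simp only [List.isEmpty_iff] at hemp
      simpa [List.length_eq_zero_iff] using hemp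
    rw [if_neg hemp, if_neg h0]
    rw [foldl_aStep_char blocks mn mx (pairsI (blocks.length : Int)) (0, (none, none))]
    set b := (pairsI (blocks.length : Int)).foldl (bStep blocks mn mx) 0 with hbdef
    by_cases hb0 : b = 0
    · rw [hb0]
      simp
    · have hA1 : (b, if b = (0 : Int) then ((none : Option Int), (none : Option Int))
          else match (pairsI (blocks.length : Int)).find?
              (fun p => gval blocks p.1 p.2 == b) with
            | some p => (some (f3I blocks p.1 + 1), some (l2I blocks p.2 - 1))
            | none => ((none : Option Int), (none : Option Int))).2 =
          match (pairsI (blocks.length : Int)).find? (fun p => gval blocks p.1 p.2 == b) with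
            | some p => (some (f3I blocks p.1 + 1), some (l2I blocks p.2 - 1))
            | none => ((none : Option Int), (none : Option Int)) := by
        simp only [if_neg hb0]
      rw [hA1, if_neg hb0]
      -- facts about b
      obtain ⟨p, hp, hpv⟩ := foldl_bStep_attained blocks mn mx _ 0 hb0
      obtain ⟨hp0, hpij, hpn⟩ := (mem_pairsI _ p).mp hp
      have hn2 : (2 : Int) ≤ (blocks.length : Int) := by omega
      -- A side: reshape the pair search into an index search
      rw [show pairsI (blocks.length : Int) = (PySem.List.pyRange 0 (blocks.length : Int) 1).flatMap
          (fun i => (PySem.List.pyRange (i + 1) (blocks.length : Int) 1).map (fun j => (i, j)))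
          from rfl,
        List.find?_flatMap]
      simp only [List.find?_map]
      have hcomp : ∀ i : Int, List.find? ((fun p : Int × Int => gval blocks p.1 p.2 == b) ∘
          (fun j => (i, j))) (PySem.List.pyRange (i + 1) (blocks.length : Int) 1) =
          List.find? (fun j => gval blocks i j == b)
            (PySem.List.pyRange (i + 1) (blocks.length : Int) 1) := fun i => rfl
      simp only [hcomp]
      rw [find_pairs blocks b (blocks.length : Int) ((none : Option Int), (none : Option Int))]
      -- drop the last index from A's search: W is false there
      have hsplit : PySem.List.pyRange 0 (blocks.length : Int) 1 =
          PySem.List.pyRange 0 ((blocks.length : Int) - 1) 1 ++ [(blocks.length : Int) - 1] := by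
        have h := PySem.List.pyRange_one_succ_right
          (a := 0) (b := (blocks.length : Int) - 1) (by omega)
        rw [show (blocks.length : Int) - 1 + 1 = (blocks.length : Int) by ring] at h
        exact h
      have hWlast : decide (W blocks (blocks.length : Int) b ((blocks.length : Int) - 1)) = false := by
        apply decide_eq_false
        unfold W
        rw [show (blocks.length : Int) - 1 + 1 = (blocks.length : Int) by ring,
          PySem.List.pyRange_one_eq_nil (by omega)]
        simp
      rw [hsplit, List.find?_append]
      have hlast : List.find? (fun i => decide (W blocks (blocks.length : Int) b i))
          [(blocks.length : Int) - 1] = none := by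
        simp [List.find?, hWlast]
      rw [hlast, Option.or_none]
      -- B side: the phase-2 loop computes the same index search
      have hm2 : ((blocks.length - 2 : Nat) : Int) = (blocks.length : Int) - 2 := by
        push_cast [Nat.cast_sub (by omega : 2 ≤ blocks.length)]; ring
      have ht0 : ∀ x, x ∈ PySem.Set.ofList [l2I blocks ((blocks.length : Int) - 1)] ↔
          ∃ j ∈ PySem.List.pyRange (((blocks.length - 2 : Nat) : Int) + 1)
            (blocks.length : Int) 1, l2I blocks j = x := by
        intro x
        rw [PySem.Set.mem_ofList, hm2,
          show (blocks.length : Int) - 2 + 1 = (blocks.length : Int) - 1 by ring,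
          show PySem.List.pyRange ((blocks.length : Int) - 1) (blocks.length : Int) 1 =
            [(blocks.length : Int) - 1] from by
              have h := PySem.List.pyRange_one_singleton ((blocks.length : Int) - 1)
              rw [show (blocks.length : Int) - 1 + 1 = (blocks.length : Int) by ring] at h
              exact h]
        constructor
        · intro hx
          simp only [List.mem_singleton] at hx
          exact ⟨(blocks.length : Int) - 1, List.mem_singleton.mpr rfl, hx.symm⟩
        · rintro ⟨j, hj, rfl⟩
          simp only [List.mem_singleton] at hj
          subst hj
          simp
      have hph2 := phase2_fold blocks (blocks.length : Int) b (blocks.length - 2)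
        none (PySem.Set.ofList [l2I blocks ((blocks.length : Int) - 1)]) (by omega) ht0
      rw [hm2] at hph2
      rw [show (blocks.length : Int) - 2 + 1 = (blocks.length : Int) - 1 by ring] at hph2
      rw [hph2]
      -- both sides now match on the same search
      cases hfind : List.find? (fun i => decide (W blocks (blocks.length : Int) b i))
          (PySem.List.pyRange 0 ((blocks.length : Int) - 1) 1) with
      | some i => rfl
      | none => rfl

-- ===== VERDICT (by name: the statement is the Claim_ definition above) =====
theorem define_max_space_spec : Claim_equal_define_max_space := by
  intro blocks min_size max_size _ _
  unfold Spec_define_max_space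
  exact equal_all blocks min_size max_size
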